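-- pv_equiv track=rewrite | github.com/jinxianyap/prolog_revision | feedback_gen/tr_ilasp/revision.py | filter_possible_head
-- ===== SOURCE A (Python) =====
-- def filter_possible_head(head):
--     split = head.split('var_vals(')
--     variables = []
--
--     for each in split:
--         if 'var_val' in each:
--             variable = [x for x in each if x.isupper()]
--             variables += variable
--
--     return variables == sorted(variables) and len(variables) == len(set(variables))
-- ===== SOURCE B (Python) =====
-- def filter_possible_head(head):
--     # collect the uppercase letters of every chunk mentioning 'var_val',
--     # then verify strict monotonic increase in one adjacent-comparison pass
--     variables = [x
--                  for each in head.split('var_vals(') if 'var_val' in each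
--                  for x in each if x.isupper()]
--     prev = None
--     for v in variables:
--         if prev is not None and v <= prev:
--             return False
--         prev = v
--     return True
-- ===== Notes on version B (the rewrite author's own statement) =====
-- stated objective: simpler
-- what changed: The sorted() copy and the set() construction are replaced by a single forward pass over the extracted letters checking strict adjacent increase (prev < v), which verifies sortedness and uniqueness at once.
import Mathlib
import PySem

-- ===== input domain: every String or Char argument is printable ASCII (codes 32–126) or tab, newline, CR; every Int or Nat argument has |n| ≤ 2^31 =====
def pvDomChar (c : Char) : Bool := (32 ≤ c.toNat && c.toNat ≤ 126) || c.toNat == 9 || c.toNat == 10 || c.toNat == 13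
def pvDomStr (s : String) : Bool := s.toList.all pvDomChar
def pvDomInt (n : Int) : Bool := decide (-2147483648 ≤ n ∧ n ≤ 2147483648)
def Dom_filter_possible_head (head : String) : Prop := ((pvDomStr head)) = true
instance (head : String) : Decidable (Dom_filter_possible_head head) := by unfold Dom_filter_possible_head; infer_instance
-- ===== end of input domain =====

-- B replaces A's sorted() copy and set() construction by one adjacent-comparison
-- pass checking strict increase of the extracted letters (objective: simpler).

-- ===== PORT A =====
def filter_possible_head (head : String) : Bool :=
  let split := PySem.Chars.splitOn head.toList "var_vals(".toList
  let vars := split.foldl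
    (fun acc each =>
      if PySem.Chars.isIn "var_val".toList each then
        acc ++ each.filter PySem.Str.isupper
      else acc)
    ([] : List Char)
  decide (vars = PySem.List.sorted vars (fun x => x)) &&
    decide (vars.length = (PySem.Set.ofList vars).length)

-- ===== PORT B =====
-- the 'prev'-tracking loop of Source B: Option Char is Python's None/prev
def fphStrictInc : Option Char → List Char → Bool
  | _, [] => true
  | none, v :: rest => fphStrictInc (some v) rest
  | some p, v :: rest => if v ≤ p then false else fphStrictInc (some v) rest

def filter_possible_head_alt (head : String) : Bool :=
  let vars :=
    ((PySem.Chars.splitOn head.toList "var_vals(".toList).filter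
        (fun each => PySem.Chars.isIn "var_val".toList each)).flatMap
      (fun each => each.filter PySem.Str.isupper)
  fphStrictInc none vars

-- ===== PRECONDITION & SPEC =====
def Spec_filter_possible_head (head : String) (out : Bool) : Prop := out = filter_possible_head_alt head
instance (head : String) (out : Bool) : Decidable (Spec_filter_possible_head head out) := by unfold Spec_filter_possible_head; infer_instance

-- ===== CLAIM (what is proved, stated in full; the proofs are below) =====
def Claim_equal_filter_possible_head : Prop := ∀ (head : String), Dom_filter_possible_head head → Spec_filter_possible_head head (filter_possible_head head)

-- ===== LEMMAS AND PROOFS =====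

-- A's accumulating loop builds the same list as B's filter+flatMap
lemma foldl_if_append_eq_flatMap_filter {α β : Type} (p : α → Bool) (g : α → List β)
    (l : List α) (acc : List β) :
    l.foldl (fun acc x => if p x then acc ++ g x else acc) acc
      = acc ++ (l.filter p).flatMap g := by
  induction l generalizing acc with
  | nil => simp
  | cons x xs ih =>
    by_cases h : p x = true <;> simp [List.foldl_cons, h, ih, List.append_assoc]

lemma fphStrictInc_some_iff (l : List Char) : ∀ p : Char,
    fphStrictInc (some p) l = true ↔ (p :: l).Pairwise (· < ·) := by
  induction l with
  | nil => simp [fphStrictInc]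
  | cons v rest ih =>
    intro p
    by_cases h : v ≤ p
    · simp only [fphStrictInc, if_pos h]
      constructor
      · intro hf; exact absurd hf (by simp)
      · intro hp
        exact absurd (List.rel_of_pairwise_cons hp (List.mem_cons_self ..)) (not_lt.mpr h)
    · simp only [fphStrictInc, if_neg h, ih]
      constructor
      · intro hp
        refine List.Pairwise.cons ?_ hp
        intro b hb
        rcases List.mem_cons.mp hb with rfl | hb
        · exact lt_of_not_ge h
        · exact lt_trans (lt_of_not_ge h) (List.rel_of_pairwise_cons hp hb)
      · intro hp; exact hp.of_cons

lemma fphStrictInc_none_iff (l : List Char) :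
    fphStrictInc none l = true ↔ l.Pairwise (· < ·) := by
  cases l with
  | nil => simp [fphStrictInc]
  | cons v rest => exact fphStrictInc_some_iff rest v

-- len(set(xs)) == len(xs) forces distinct elements
lemma nodup_of_length_ofList {α : Type} [BEq α] [LawfulBEq α] (l : List α)
    (h : l.length = (PySem.Set.ofList l).length) : l.Nodup := by
  induction l with
  | nil => simp
  | cons x xs ih =>
    rw [PySem.Set.ofList_cons] at h
    simp only [List.length_cons, PySem.Set.discard] at h
    by_cases hx : x ∈ xs
    · exfalso
      have hlt : ((PySem.Set.ofList xs).filter (fun y => !y == x)).length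
          < (PySem.Set.ofList xs).length := by
        apply List.length_filter_lt_length_iff_exists.mpr
        exact ⟨x, (PySem.Set.mem_ofList xs x).mpr hx, by simp⟩
      have hle := PySem.Set.length_ofList_le xs
      omega
    · have hfeq : (PySem.Set.ofList xs).filter (fun y => !y == x) = PySem.Set.ofList xs := by
        apply List.filter_eq_self.mpr
        intro y hy
        have : y ∈ xs := (PySem.Set.mem_ofList xs y).mp hy
        simp only [Bool.not_eq_eq_eq_not, Bool.not_true, beq_eq_false_iff_ne]
        exact fun e => hx (e ▸ this)
      rw [hfeq] at h
      exact List.Nodup.cons hx (ih (by omega))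

lemma strict_iff_sorted_nodup (l : List Char) :
    (decide (l = PySem.List.sorted l (fun x => x)) &&
      decide (l.length = (PySem.Set.ofList l).length)) = fphStrictInc none l := by
  rw [Bool.eq_iff_iff]
  simp only [Bool.and_eq_true, decide_eq_true_eq, fphStrictInc_none_iff]
  constructor
  · rintro ⟨hs, hl⟩
    have hle : l.Pairwise (fun a b => a ≤ b) := by
      have := PySem.List.sorted_pairwise l (fun x => x)
      rw [← hs] at this
      exact this
    have hnd : l.Pairwise (· ≠ ·) := nodup_of_length_ofList l hl
    exact (hle.and hnd).imp (fun ⟨h1, h2⟩ => lt_of_le_of_ne h1 h2)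
  · intro hp
    refine ⟨(PySem.List.sorted_eq_self_of_pairwise l (fun x => x)
        (hp.imp le_of_lt)).symm, ?_⟩
    have hnd : l.Nodup := hp.imp ne_of_lt
    rw [PySem.Set.ofList_eq_self_of_nodup l hnd]

-- ===== VERDICT (by name: the statement is the Claim_ definition above) =====
theorem filter_possible_head_spec : Claim_equal_filter_possible_head := by
  intro head _
  show filter_possible_head head = filter_possible_head_alt head
  simp only [filter_possible_head, filter_possible_head_alt]
  rw [foldl_if_append_eq_flatMap_filter, List.nil_append, strict_iff_sorted_nodup]
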